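-- pv_equiv track=rewrite | github.com/sankhadip10/scaler_problems | Leetcode/2025/7th_jan.py | find_substrings_brute_force
-- ===== SOURCE A (Python) =====
-- from typing import List
-- from typing import List
--
-- def find_substrings_brute_force(words:List[str]) -> List[str]:
--     words.sort(key=len)
--     result = []
--     word_set = set(words)
--
--     for i in range(len(words)):
--         for j in range(i+1,len(words)):
--             if words[i] in words[j]:
--                 result.append(words[i])
--                 break
--     return result
-- ===== SOURCE B (Python) =====
-- def find_substrings_brute_force(words):
--     words.sort(key=len)
--     seen = set()
--     out = []
--     for w in reversed(words):
--         if w in seen: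
--             out.append(w)
--         n = len(w)
--         for a in range(n + 1):
--             for b in range(a, n + 1):
--                 seen.add(w[a:b])
--     out.reverse()
--     return out
-- ===== Notes on version B (the rewrite author's own statement) =====
-- stated objective: faster
-- what changed: Replaces the O(n^2) all-pairs substring scans by a single right-to-left pass over the length-sorted list that maintains a hash set of every substring of the words processed so far, so each word is decided by one set lookup.
import Mathlib
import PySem

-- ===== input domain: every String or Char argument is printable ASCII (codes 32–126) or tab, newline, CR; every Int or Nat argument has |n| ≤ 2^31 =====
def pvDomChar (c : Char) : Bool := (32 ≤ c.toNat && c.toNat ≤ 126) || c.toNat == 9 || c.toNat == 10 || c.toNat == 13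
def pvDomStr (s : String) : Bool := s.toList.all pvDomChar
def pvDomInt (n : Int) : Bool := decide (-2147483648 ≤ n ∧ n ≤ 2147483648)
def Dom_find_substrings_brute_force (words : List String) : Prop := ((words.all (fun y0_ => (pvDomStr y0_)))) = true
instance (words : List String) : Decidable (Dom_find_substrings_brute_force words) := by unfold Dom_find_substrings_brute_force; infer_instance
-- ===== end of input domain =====

-- B replaces A's O(n²) pairwise substring scans by one right-to-left pass that maintains a set of
-- all substrings of the already-processed (longer) words, so each word needs one set lookup.
-- Note: A sorts its argument list in place (B's Python does the same); the theorem is about the return value.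

-- ===== PORT A =====
def find_substrings_brute_force (words : List String) : List String :=
  let ws := PySem.List.sorted words (fun w => PySem.Str.len w) false
  let n : Int := ws.length
  -- inner 'for j … if … : append; break' appends words[i] once iff some later word contains it
  (PySem.List.pyRange 0 n 1).foldl (fun result i =>
    if (PySem.List.pyRange (i+1) n 1).any
        (fun j => PySem.Str.isIn (PySem.List.pyGetD ws i "") (PySem.List.pyGetD ws j "")) then
      result ++ [PySem.List.pyGetD ws i ""]
    else result) []

-- ===== PORT B =====
-- seen.add(w[a:b]) for all 0 ≤ a ≤ b ≤ len(w)
def pvAddSubs (s : PySem.Set String) (w : String) : PySem.Set String :=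
  let n : Int := PySem.Str.len w
  (PySem.List.pyRange 0 (n+1) 1).foldl (fun s a =>
    (PySem.List.pyRange a (n+1) 1).foldl (fun s b =>
      PySem.Set.add s (PySem.Str.slice w (some a) (some b))) s) s

def find_substrings_brute_force_alt (words : List String) : List String :=
  let ws := PySem.List.sorted words (fun w => PySem.Str.len w) false
  let st := ws.reverse.foldl (fun (acc : PySem.Set String × List String) w =>
      (pvAddSubs acc.1 w, if PySem.Set.contains acc.1 w then acc.2 ++ [w] else acc.2))
    (PySem.Set.empty, [])
  st.2.reverse

-- ===== PRECONDITION & SPEC =====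
def Spec_find_substrings_brute_force (words : List String) (out : List String) : Prop := out = find_substrings_brute_force_alt words
instance (words : List String) (out : List String) : Decidable (Spec_find_substrings_brute_force words out) := by unfold Spec_find_substrings_brute_force; infer_instance

-- ===== CLAIM (what is proved, stated in full; the proofs are below) =====
def Claim_equal_find_substrings_brute_force : Prop := ∀ (words : List String), Dom_find_substrings_brute_force words → Spec_find_substrings_brute_force words (find_substrings_brute_force words)

-- ===== LEMMAS AND PROOFS =====

-- common reference function: keep w iff some later word contains it
def pvGo : List String → List String
  | [] => []
  | w :: t => (if t.any (fun u => PySem.Str.isIn w u) then [w] else []) ++ pvGo t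

-- generic: folding a step that adds elements satisfying P
theorem pv_mem_foldl_step {α β : Type} [BEq α] [LawfulBEq α]
    (step : PySem.Set α → β → PySem.Set α) (P : β → α → Prop) (x : α)
    (hstep : ∀ s a, x ∈ step s a ↔ x ∈ s ∨ P a x) :
    ∀ (l : List β) (s : PySem.Set α), x ∈ l.foldl step s ↔ x ∈ s ∨ ∃ a ∈ l, P a x := by
  intro l
  induction l with
  | nil => simp
  | cons a t ih =>
    intro s
    rw [List.foldl_cons, ih, hstep]
    simp only [List.mem_cons]
    constructor
    · rintro ((h | h) | ⟨b, hb, h⟩)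
      · exact Or.inl h
      · exact Or.inr ⟨a, Or.inl rfl, h⟩
      · exact Or.inr ⟨b, Or.inr hb, h⟩
    · rintro (h | ⟨b, (rfl | hb), h⟩)
      · exact Or.inl (Or.inl h)
      · exact Or.inl (Or.inr h)
      · exact Or.inr ⟨b, hb, h⟩

-- membership in a slice-enumeration set = infix
theorem pv_mem_addSubs (s : PySem.Set String) (u x : String) :
    x ∈ pvAddSubs s u ↔ x ∈ s ∨ x.toList <:+: u.toList := by
  have hn : PySem.Str.len u = (u.toList.length : Int) := by
    simp only [PySem.Str.len_eq]
  unfold pvAddSubs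
  rw [pv_mem_foldl_step _ (fun a x => ∃ b ∈ PySem.List.pyRange a (PySem.Str.len u + 1) 1,
        x = PySem.Str.slice u (some a) (some b)) x
      (fun s a => pv_mem_foldl_step _ (fun b x => x = PySem.Str.slice u (some a) (some b)) x
        (fun s b => PySem.Set.mem_add s _ x) _ s)]
  constructor
  · rintro (h | ⟨a, ha, b, hb, rfl⟩)
    · exact Or.inl h
    · refine Or.inr ?_
      rw [PySem.List.mem_pyRange_one] at ha hb
      rw [PySem.Str.toList_slice, PySem.Chars.slice_eq_listSlice,
        PySem.List.slice_toNat _ ha.1 (le_trans ha.1 hb.1)]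
      exact ((List.take_prefix _ _).isInfix).trans ((List.drop_suffix _ _).isInfix)
  · rintro (h | h)
    · exact Or.inl h
    · obtain ⟨p, t, hpt⟩ := h
      have hx : x.toList.length = x.length := by simp
      have hu : u.toList.length = u.length := by simp
      refine Or.inr ⟨(p.length : Int), ?_, ((p.length + x.toList.length : Nat) : Int), ?_, ?_⟩
      · rw [PySem.List.mem_pyRange_one, hn]
        have := congrArg List.length hpt
        simp at this
        omega
      · rw [PySem.List.mem_pyRange_one, hn]
        have := congrArg List.length hpt
        simp at this
        push_cast
        omega
      · apply String.toList_inj.mp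
        rw [PySem.Str.toList_slice, PySem.Chars.slice_eq_listSlice,
          PySem.List.slice_natCast]
        rw [List.append_assoc] at hpt
        rw [← hpt, List.drop_left, Nat.add_sub_cancel_left, List.take_left]

-- membership after folding pvAddSubs over a list
theorem pv_mem_foldl_addSubs (l : List String) (s : PySem.Set String) (x : String) :
    x ∈ l.foldl pvAddSubs s ↔ x ∈ s ∨ ∃ u ∈ l, x.toList <:+: u.toList := by
  induction l generalizing s with
  | nil => simp
  | cons w t ih =>
    simp only [List.foldl_cons, ih, pv_mem_addSubs, List.mem_cons]
    constructor
    · rintro ((h | h) | ⟨u, hu, h⟩)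
      · exact Or.inl h
      · exact Or.inr ⟨w, Or.inl rfl, h⟩
      · exact Or.inr ⟨u, Or.inr hu, h⟩
    · rintro (h | ⟨u, (rfl | hu), h⟩)
      · exact Or.inl (Or.inl h)
      · exact Or.inl (Or.inr h)
      · exact Or.inr ⟨u, hu, h⟩

-- B's accumulating fold, written recursively (output in processing order)
def pvBRec : List String → PySem.Set String → List String
  | [], _ => []
  | w :: t, s => (if PySem.Set.contains s w then [w] else []) ++ pvBRec t (pvAddSubs s w)

theorem pv_fold_eq_bRec (l : List String) (s : PySem.Set String) (out : List String) :
    (l.foldl (fun (acc : PySem.Set String × List String) w =>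
      (pvAddSubs acc.1 w, if PySem.Set.contains acc.1 w then acc.2 ++ [w] else acc.2)) (s, out)).2
    = out ++ pvBRec l s := by
  induction l generalizing s out with
  | nil => simp [pvBRec]
  | cons w t ih =>
    simp only [List.foldl_cons, pvBRec, ih]
    split <;> simp

theorem pv_bRec_append (xs ys : List String) (s : PySem.Set String) :
    pvBRec (xs ++ ys) s = pvBRec xs s ++ pvBRec ys (xs.foldl pvAddSubs s) := by
  induction xs generalizing s with
  | nil => simp [pvBRec]
  | cons w t ih => simp [pvBRec, ih, List.append_assoc]

theorem pv_bRec_reverse_eq_go (l : List String) :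
    (pvBRec l.reverse PySem.Set.empty).reverse = pvGo l := by
  induction l with
  | nil => simp [pvBRec, pvGo]
  | cons w t ih =>
    have hmem : PySem.Set.contains (t.reverse.foldl pvAddSubs PySem.Set.empty) w
        = t.any (fun u => PySem.Str.isIn w u) := by
      rcases hb : t.any (fun u => PySem.Str.isIn w u) with _ | _
      · rw [Bool.eq_false_iff]
        intro hc
        rw [PySem.Set.contains_iff, pv_mem_foldl_addSubs] at hc
        rcases hc with h | ⟨u, hu, h⟩
        · simp [PySem.Set.empty] at h
        · rw [List.any_eq_false] at hb
          exact hb u (List.mem_reverse.mp hu) ((PySem.Str.isIn_iff_infix w u).mpr h)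
      · rw [List.any_eq_true] at hb
        obtain ⟨u, hu, h⟩ := hb
        rw [PySem.Set.contains_iff, pv_mem_foldl_addSubs]
        exact Or.inr ⟨u, List.mem_reverse.mpr hu, (PySem.Str.isIn_iff_infix w u).mp h⟩
    calc (pvBRec (w :: t).reverse PySem.Set.empty).reverse
        = (pvBRec (t.reverse ++ [w]) PySem.Set.empty).reverse := by simp
      _ = ((pvBRec t.reverse PySem.Set.empty)
            ++ (if PySem.Set.contains (t.reverse.foldl pvAddSubs PySem.Set.empty) w then [w] else [])).reverse := by
            rw [pv_bRec_append]; simp [pvBRec]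
      _ = pvGo (w :: t) := by
            rw [hmem, pvGo, List.reverse_append, ih]
            split <;> simp

-- A's indexed outer loop from index k builds pvGo of the k-th suffix
theorem pv_outer (fuel : Nat) (l : List String) (k : Nat) (res : List String)
    (hf : l.length - k = fuel) :
    (PySem.List.pyRange (k : Int) (l.length : Int) 1).foldl (fun result i =>
      if (PySem.List.pyRange (i+1) (l.length : Int) 1).any
          (fun j => PySem.Str.isIn (PySem.List.pyGetD l i "") (PySem.List.pyGetD l j "")) then
        result ++ [PySem.List.pyGetD l i ""]
      else result) res
    = res ++ pvGo (l.drop k) := by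
  induction fuel generalizing k res with
  | zero =>
    have hk : l.length ≤ k := by omega
    rw [PySem.List.pyRange_one_eq_nil (by exact_mod_cast hk), List.foldl_nil,
      List.drop_eq_nil_of_le hk]
    simp [pvGo]
  | succ m ih =>
    have hk : k < l.length := by omega
    rw [PySem.List.pyRange_one_cons (by exact_mod_cast hk), List.foldl_cons]
    have hget : PySem.List.pyGetD l (k : Int) "" = l[k] :=
      PySem.List.pyGetD_eq_getElem l "" (by positivity) (by exact_mod_cast hk)
    have hcast : ((k : Int) + 1) = ((k + 1 : Nat) : Int) := by push_cast; ring
    have hany : (PySem.List.pyRange ((k : Int)+1) (l.length : Int) 1).any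
          (fun j => PySem.Str.isIn (PySem.List.pyGetD l (k : Int) "") (PySem.List.pyGetD l j ""))
        = (l.drop (k+1)).any (fun u => PySem.Str.isIn l[k] u) := by
      have h1 : (PySem.List.pyRange ((k : Int)+1) (l.length : Int) 1).map
            (fun j => PySem.List.pyGetD l j "") = l.drop (k+1) := by
        rw [PySem.List.map_pyGetD_pyRange' l "" (a := (k : Int) + 1) (by positivity)]
        norm_num
      rw [hget, ← h1, List.any_map]
      rfl
    rw [hany, List.drop_eq_getElem_cons hk, pvGo, hget]
    by_cases hc : (l.drop (k+1)).any (fun u => PySem.Str.isIn l[k] u)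
    · rw [if_pos hc, if_pos hc, hcast, ih (k+1) _ (by omega)]
      simp
    · rw [if_neg hc, if_neg hc, hcast, ih (k+1) _ (by omega)]
      simp

-- A's result equals pvGo of the sorted list
theorem pv_A_eq_go (ws : List String) :
    find_substrings_brute_force ws = pvGo (PySem.List.sorted ws (fun w => PySem.Str.len w) false) := by
  have := pv_outer ((PySem.List.sorted ws (fun w => PySem.Str.len w) false).length)
    (PySem.List.sorted ws (fun w => PySem.Str.len w) false) 0 [] (by omega)
  simpa [find_substrings_brute_force] using this

-- ===== VERDICT (by name: the statement is the Claim_ definition above) =====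
theorem find_substrings_brute_force_spec : Claim_equal_find_substrings_brute_force := by
  intro words _
  unfold Spec_find_substrings_brute_force
  rw [pv_A_eq_go]
  have hB : find_substrings_brute_force_alt words
      = (pvBRec (PySem.List.sorted words (fun w => PySem.Str.len w) false).reverse
          PySem.Set.empty).reverse := by
    show (List.foldl (fun (acc : PySem.Set String × List String) w =>
        (pvAddSubs acc.1 w, if PySem.Set.contains acc.1 w then acc.2 ++ [w] else acc.2))
        (PySem.Set.empty, [])
        (PySem.List.sorted words (fun w => PySem.Str.len w) false).reverse).2.reverse = _
    rw [pv_fold_eq_bRec, List.nil_append]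
  rw [hB, pv_bRec_reverse_eq_go]
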